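-- pv_equiv track=rewrite | github.com/Cybernith/codeforces | GenomeDecoding/awnser.py | decode_genome
-- ===== SOURCE A (Python) =====
-- def decode_genome(length: int, genome: str) -> str:
--     if length % 4 != 0:
--         return "==="
--
--     target = length // 4
--
--     count_a = genome.count("A")
--     count_c = genome.count("C")
--     count_g = genome.count("G")
--     count_t = genome.count("T")
--     count_q = genome.count("?")
--
--     if (
--         count_a > target
--         or count_c > target
--         or count_g > target
--         or count_t > target
--     ):
--         return "==="
--
--     need_a = target - count_a
--     need_c = target - count_c
--     need_g = target - count_g
--     need_t = target - count_t
--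
--     if need_a + need_c + need_g + need_t != count_q:
--         return "==="
--
--     result_chars: list[str] = []
--     for ch in genome:
--         if ch != "?":
--             result_chars.append(ch)
--             continue
--
--         if need_a > 0:
--             result_chars.append("A")
--             need_a -= 1
--         elif need_c > 0:
--             result_chars.append("C")
--             need_c -= 1
--         elif need_g > 0:
--             result_chars.append("G")
--             need_g -= 1
--         elif need_t > 0:
--             result_chars.append("T")
--             need_t -= 1
--         else:
--             result_chars.append("A")
--
--     return "".join(result_chars)
-- ===== SOURCE B (Python) =====
-- def decode_genome(length: int, genome: str) -> str:
--     if length % 4 != 0: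
--         return "==="
--     target = length // 4
--     if sum(genome.count(b) for b in "ACGT?") != length:
--         return "==="
--     s = genome
--     for b in "ACGT":
--         n = target - genome.count(b)
--         if n < 0:
--             return "==="
--         s = s.replace("?", b, n)
--     return s
-- ===== Notes on version B (the rewrite author's own statement) =====
-- stated objective: simpler
-- what changed: B drops A's per-character loop with four need counters entirely: it validates by one total-count check (sum of ACGT? counts == length) and then performs four staged whole-string str.replace('?', base, n) passes, one per base.
import Mathlib
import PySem

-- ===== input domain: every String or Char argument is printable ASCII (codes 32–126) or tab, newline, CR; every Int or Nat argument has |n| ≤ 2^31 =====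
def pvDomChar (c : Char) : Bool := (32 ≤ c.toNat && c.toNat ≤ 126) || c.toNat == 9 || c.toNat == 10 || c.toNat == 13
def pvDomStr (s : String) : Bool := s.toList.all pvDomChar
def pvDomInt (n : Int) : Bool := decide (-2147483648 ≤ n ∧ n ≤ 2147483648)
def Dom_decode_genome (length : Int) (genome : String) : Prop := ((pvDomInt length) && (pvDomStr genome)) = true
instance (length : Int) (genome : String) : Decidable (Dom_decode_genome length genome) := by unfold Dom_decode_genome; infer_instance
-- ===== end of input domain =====

-- B replaces A's per-character loop with its four-way need-counter branching by
-- four staged whole-string str.replace("?", base, n) passes (objective: simpler).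

-- ===== PORT A =====
-- A's result loop: decrement the first positive need at each '?', else append 'A'.
def pvLoopA : List Char → Int → Int → Int → Int → List Char
  | [], _, _, _, _ => []
  | ch :: cs, na, nc, ng, nt =>
    if ch ≠ '?' then ch :: pvLoopA cs na nc ng nt
    else if na > 0 then 'A' :: pvLoopA cs (na - 1) nc ng nt
    else if nc > 0 then 'C' :: pvLoopA cs na (nc - 1) ng nt
    else if ng > 0 then 'G' :: pvLoopA cs na nc (ng - 1) nt
    else if nt > 0 then 'T' :: pvLoopA cs na nc ng (nt - 1)
    else 'A' :: pvLoopA cs na nc ng nt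

def decode_genome (length : Int) (genome : String) : String :=
  if PySem.Int.mod length 4 ≠ 0 then "===" else
  let target := PySem.Int.floordiv length 4
  let count_a : Int := (PySem.Str.count genome "A" : Int)
  let count_c : Int := (PySem.Str.count genome "C" : Int)
  let count_g : Int := (PySem.Str.count genome "G" : Int)
  let count_t : Int := (PySem.Str.count genome "T" : Int)
  let count_q : Int := (PySem.Str.count genome "?" : Int)
  if count_a > target ∨ count_c > target ∨ count_g > target ∨ count_t > target then "===" else
  let need_a := target - count_a
  let need_c := target - count_c
  let need_g := target - count_g
  let need_t := target - count_t
  if need_a + need_c + need_g + need_t ≠ count_q then "===" else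
  String.ofList (pvLoopA genome.toList need_a need_c need_g need_t)

-- ===== PORT B =====
-- s.replace("?", c, n) for a single-character pattern, ported by hand (PySem.Str.replace
-- has no count argument): replace the first n occurrences of '?' by c; as in Python,
-- a negative n replaces every occurrence and n = 0 replaces none. Exact on this use.
def pvReplaceQ : List Char → Int → Char → List Char
  | [], _, _ => []
  | ch :: cs, n, c =>
    if ch = '?' ∧ n ≠ 0 then c :: pvReplaceQ cs (n - 1) c
    else ch :: pvReplaceQ cs n c

-- B's for-loop over "ACGT" with its early 'return "==="' (none = that return taken).
def pvStages : List Char → Int → List Char → List Char → Option (List Char)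
  | [], _, _, s => some s
  | b :: bs, target, g, s =>
    let n := target - (PySem.Chars.count g [b] : Int)
    if n < 0 then none
    else pvStages bs target g (pvReplaceQ s n b)

def decode_genome_alt (length : Int) (genome : String) : String :=
  if PySem.Int.mod length 4 ≠ 0 then "===" else
  let target := PySem.Int.floordiv length 4
  -- sum(genome.count(b) for b in "ACGT?") != length
  if (['A', 'C', 'G', 'T', '?'].map (fun b => ((PySem.Chars.count genome.toList [b] : Nat) : Int))).sum ≠ length then "===" else
  match pvStages ['A', 'C', 'G', 'T'] target genome.toList genome.toList with
  | none => "==="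
  | some s => String.ofList s

-- ===== PRECONDITION & SPEC =====
def Spec_decode_genome (length : Int) (genome : String) (out : String) : Prop := out = decode_genome_alt length genome
instance (length : Int) (genome : String) (out : String) : Decidable (Spec_decode_genome length genome out) := by unfold Spec_decode_genome; infer_instance

-- ===== CLAIM (what is proved, stated in full; the proofs are below) =====
def Claim_equal_decode_genome : Prop := ∀ (length : Int) (genome : String), Dom_decode_genome length genome → Spec_decode_genome length genome (decode_genome length genome)

-- ===== LEMMAS AND PROOFS =====

-- PySem.Chars.count with a single-character needle is List.count (no prelude lemma covers it).
theorem pvCountGo_singleton (c : Char) (l : List Char) (fuel acc : Nat)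
    (h : l.length ≤ fuel) :
    PySem.Chars.count.go [c] fuel l acc = acc + l.count c := by
  induction l generalizing fuel acc with
  | nil => cases fuel <;> simp [PySem.Chars.count.go]
  | cons x xs ih =>
    cases fuel with
    | zero => simp at h
    | succ n =>
      simp only [List.length_cons, Nat.succ_le_succ_iff] at h
      by_cases hx : x = c
      · subst hx
        simp [PySem.Chars.count.go, List.isPrefixOf, ih _ _ h]
        omega
      · have hp : ([c].isPrefixOf (x :: xs)) = false := by
          simp [List.isPrefixOf]; exact fun h' => absurd h'.symm hx
        simp [PySem.Chars.count.go, hp, ih _ _ h, hx]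

theorem pvCount_singleton (s : List Char) (c : Char) :
    PySem.Chars.count s [c] = s.count c := by
  simp [PySem.Chars.count, pvCountGo_singleton c s s.length 0 le_rfl]

theorem pvReplaceQ_zero (l : List Char) (c : Char) : pvReplaceQ l 0 c = l := by
  induction l with
  | nil => rfl
  | cons ch cs ih => simp [pvReplaceQ, ih]

theorem pvReplaceQ_cons_ne (ch : Char) (h : ch ≠ '?') (cs : List Char) (n : Int) (c : Char) :
    pvReplaceQ (ch :: cs) n c = ch :: pvReplaceQ cs n c := by
  simp [pvReplaceQ, h]

-- core invariant: A's four-counter loop equals B's four staged replaces while the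
-- needs are nonnegative and cover the '?' remaining.
theorem pvLoop_eq (cs : List Char) (na nc ng nt : Int)
    (ha : 0 ≤ na) (hc : 0 ≤ nc) (hg : 0 ≤ ng) (ht : 0 ≤ nt)
    (hsum : (cs.count '?' : Int) ≤ na + nc + ng + nt) :
    pvLoopA cs na nc ng nt =
      pvReplaceQ (pvReplaceQ (pvReplaceQ (pvReplaceQ cs na 'A') nc 'C') ng 'G') nt 'T' := by
  induction cs generalizing na nc ng nt with
  | nil => simp [pvLoopA, pvReplaceQ]
  | cons ch cs ih =>
    by_cases hch : ch = '?'
    · subst hch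
      rw [List.count_cons_self] at hsum
      push_cast at hsum
      rw [pvLoopA]
      simp only [ne_eq, not_true_eq_false, if_false]
      by_cases hna : na > 0
      · rw [if_pos hna]
        have : pvReplaceQ ('?' :: cs) na 'A' = 'A' :: pvReplaceQ cs (na - 1) 'A' := by
          simp [pvReplaceQ]; omega
        rw [this, pvReplaceQ_cons_ne 'A' (by decide), pvReplaceQ_cons_ne 'A' (by decide),
          pvReplaceQ_cons_ne 'A' (by decide)]
        rw [ih (na - 1) nc ng nt (by omega) hc hg ht (by omega)]
      · have hna0 : na = 0 := by omega
        subst hna0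
        rw [if_neg hna, pvReplaceQ_zero]
        by_cases hnc : nc > 0
        · rw [if_pos hnc]
          have : pvReplaceQ ('?' :: cs) nc 'C' = 'C' :: pvReplaceQ cs (nc - 1) 'C' := by
            simp [pvReplaceQ]; omega
          rw [this, pvReplaceQ_cons_ne 'C' (by decide), pvReplaceQ_cons_ne 'C' (by decide)]
          have := ih 0 (nc - 1) ng nt le_rfl (by omega) hg ht (by omega)
          rw [pvReplaceQ_zero] at this
          rw [this]
        · have hnc0 : nc = 0 := by omega
          subst hnc0
          rw [if_neg hnc, pvReplaceQ_zero]
          by_cases hng : ng > 0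
          · rw [if_pos hng]
            have : pvReplaceQ ('?' :: cs) ng 'G' = 'G' :: pvReplaceQ cs (ng - 1) 'G' := by
              simp [pvReplaceQ]; omega
            rw [this, pvReplaceQ_cons_ne 'G' (by decide)]
            have := ih 0 0 (ng - 1) nt le_rfl le_rfl (by omega) ht (by omega)
            rw [pvReplaceQ_zero, pvReplaceQ_zero] at this
            rw [this]
          · have hng0 : ng = 0 := by omega
            subst hng0
            rw [if_neg hng, pvReplaceQ_zero]
            have hnt : nt > 0 := by omega
            rw [if_pos hnt]
            have : pvReplaceQ ('?' :: cs) nt 'T' = 'T' :: pvReplaceQ cs (nt - 1) 'T' := by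
              simp [pvReplaceQ]; omega
            rw [this]
            have := ih 0 0 0 (nt - 1) le_rfl le_rfl le_rfl (by omega) (by omega)
            rw [pvReplaceQ_zero, pvReplaceQ_zero, pvReplaceQ_zero] at this
            rw [this]
    · rw [pvLoopA, if_pos hch,
        pvReplaceQ_cons_ne ch hch, pvReplaceQ_cons_ne ch hch, pvReplaceQ_cons_ne ch hch,
        pvReplaceQ_cons_ne ch hch]
      have hcount : (ch :: cs).count '?' = cs.count '?' := by simp [hch]
      rw [ih na nc ng nt ha hc hg ht (by rw [hcount] at hsum; exact hsum)]

theorem decode_genome_eq_alt (length : Int) (genome : String) :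
    decode_genome length genome = decode_genome_alt length genome := by
  unfold decode_genome decode_genome_alt
  by_cases hmod : PySem.Int.mod length 4 ≠ 0
  · rw [if_pos hmod, if_pos hmod]
  · rw [if_neg hmod, if_neg hmod]
    push Not at hmod
    have hlen : length = 4 * PySem.Int.floordiv length 4 := by
      have := PySem.Int.floordiv_mul_add_mod length 4
      omega
    set target := PySem.Int.floordiv length 4 with htarget
    have hcA : (PySem.Str.count genome "A" : Int) = (genome.toList.count 'A' : Int) := by
      rw [PySem.Str.count_eq]; exact_mod_cast congrArg _ (pvCount_singleton genome.toList 'A')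
    have hcC : (PySem.Str.count genome "C" : Int) = (genome.toList.count 'C' : Int) := by
      rw [PySem.Str.count_eq]; exact_mod_cast congrArg _ (pvCount_singleton genome.toList 'C')
    have hcG : (PySem.Str.count genome "G" : Int) = (genome.toList.count 'G' : Int) := by
      rw [PySem.Str.count_eq]; exact_mod_cast congrArg _ (pvCount_singleton genome.toList 'G')
    have hcT : (PySem.Str.count genome "T" : Int) = (genome.toList.count 'T' : Int) := by
      rw [PySem.Str.count_eq]; exact_mod_cast congrArg _ (pvCount_singleton genome.toList 'T')
    have hcQ : (PySem.Str.count genome "?" : Int) = (genome.toList.count '?' : Int) := by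
      rw [PySem.Str.count_eq]; exact_mod_cast congrArg _ (pvCount_singleton genome.toList '?')
    set ca : Int := (genome.toList.count 'A' : Int) with hca
    set cc : Int := (genome.toList.count 'C' : Int) with hcc
    set cg : Int := (genome.toList.count 'G' : Int) with hcg
    set ct : Int := (genome.toList.count 'T' : Int) with hct
    set cq : Int := (genome.toList.count '?' : Int) with hcq
    have h0a : 0 ≤ ca := by positivity
    have h0c : 0 ≤ cc := by positivity
    have h0g : 0 ≤ cg := by positivity
    have h0t : 0 ≤ ct := by positivity
    have h0q : 0 ≤ cq := by positivity
    simp only [hcA, hcC, hcG, hcT, hcQ]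
    simp only [List.map_cons, List.map_nil, List.sum_cons, List.sum_nil,
      pvCount_singleton, pvStages]
    simp only [← hca, ← hcc, ← hcg, ← hct, ← hcq]
    by_cases hover : ca > target ∨ cc > target ∨ cg > target ∨ ct > target
    · rw [if_pos hover]
      by_cases hsum : ca + (cc + (cg + (ct + (cq + 0)))) ≠ length
      · rw [if_pos hsum]
      · rw [if_neg hsum]
        -- some need is negative: the staged loop returns none
        by_cases h1 : target - ca < 0
        · simp [h1]
        · rw [if_neg h1]
          by_cases h2 : target - cc < 0
          · simp [h2]
          · rw [if_neg h2]
            by_cases h3 : target - cg < 0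
            · simp [h3]
            · rw [if_neg h3]
              have h4 : target - ct < 0 := by omega
              simp [h4]
    · rw [if_neg hover]
      push Not at hover
      by_cases hq : target - ca + (target - cc) + (target - cg) + (target - ct) ≠ cq
      · rw [if_pos hq, if_pos (by omega : ca + (cc + (cg + (ct + (cq + 0)))) ≠ length)]
      · rw [if_neg hq, if_neg (by omega : ¬ ca + (cc + (cg + (ct + (cq + 0)))) ≠ length)]
        push Not at hq
        rw [if_neg (by omega : ¬ target - ca < 0), if_neg (by omega : ¬ target - cc < 0),
          if_neg (by omega : ¬ target - cg < 0), if_neg (by omega : ¬ target - ct < 0)]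
        congr 1
        exact pvLoop_eq genome.toList _ _ _ _ (by omega) (by omega) (by omega) (by omega)
          (by rw [← hcq]; omega)

-- ===== VERDICT (by name: the statement is the Claim_ definition above) =====
theorem decode_genome_spec : Claim_equal_decode_genome := by
  intro length genome _
  unfold Spec_decode_genome
  exact decode_genome_eq_alt length genome
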